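-- pv_equiv track=rewrite | github.com/sairatnam123/Python_Projects | geek_for_geeks/rotate_delete.py | last_element
-- ===== SOURCE A (Python) =====
-- def last_element(arr):
--     """
--     Returns the last element left in the array after performing the specified operations.
--
--     :param arr: The input array of integers.
--     :return: The last element left in the array.
--     """
--     sz = len(arr)
--     start = 0
--     for k in range(1, sz // 2 + 1):
--
--         start = (start - 1) % len(arr)
--
--         delete_index = (start + sz - k) % len(arr)
--
--         arr.pop(delete_index)
--
--         if delete_index <= start:
--             start -= 1
--
--         sz -= 1
--
--     return arr[start]
-- ===== SOURCE B (Python) =====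
-- def last_element(arr):
--     """
--     Returns the last element left in the array after performing the specified operations.
--
--     Same simulation kept on an explicitly rotated copy: instead of tracking a start
--     pointer with modular arithmetic, rotate the list right by one each round and delete
--     the k-th element from the end.  (Does not mutate arr, unlike the original.)
--     """
--     lst = list(arr)
--     for k in range(1, len(arr) // 2 + 1):
--         lst.insert(0, lst.pop())     # rotate right by one
--         del lst[len(lst) - k]        # delete the k-th element from the end
--     return lst[0]
-- ===== Notes on version B (the rewrite author's own statement) =====
-- stated objective: alternative
-- what changed: B replaces A's start-pointer bookkeeping (modular index arithmetic, in-place pops, conditional pointer fixup) with a physically rotated copy: each round it rotates the list right by one and deletes the k-th element from the end, finally returning the head.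
import Mathlib
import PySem

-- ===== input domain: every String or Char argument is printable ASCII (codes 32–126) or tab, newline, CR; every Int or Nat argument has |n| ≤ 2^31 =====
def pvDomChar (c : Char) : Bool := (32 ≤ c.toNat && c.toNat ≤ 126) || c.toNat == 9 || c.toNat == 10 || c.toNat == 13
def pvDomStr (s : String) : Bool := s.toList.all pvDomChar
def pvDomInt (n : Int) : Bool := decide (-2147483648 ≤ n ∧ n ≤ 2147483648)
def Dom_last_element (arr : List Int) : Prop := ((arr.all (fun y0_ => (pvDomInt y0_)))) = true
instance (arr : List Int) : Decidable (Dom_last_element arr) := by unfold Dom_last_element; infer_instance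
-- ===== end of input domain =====

-- B keeps the same rotate-delete simulation but on an explicitly rotated copy instead of A's
-- start pointer with modular index arithmetic; A mutates its argument in place, B does not —
-- the equivalence proved here is about the return value only.

-- ===== PORT A =====
-- one iteration of A's loop: state (arr, start, sz)
def lastElementStepA (st : List Int × Int × Int) (k : Int) : List Int × Int × Int :=
  let arr := st.1
  let start := st.2.1
  let sz := st.2.2
  let start := PySem.Int.mod (start - 1) (arr.length : Int)
  let delete_index := PySem.Int.mod (start + sz - k) (arr.length : Int)
  let arr := ((PySem.List.pop? arr delete_index).map Prod.snd).getD arr  -- pop is always in range here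
  let start := if delete_index ≤ start then start - 1 else start
  (arr, start, sz - 1)

def last_element (arr : List Int) : Int :=
  let sz : Int := arr.length
  let st := (PySem.List.pyRange 1 (PySem.Int.floordiv sz 2 + 1) 1).foldl lastElementStepA (arr, 0, sz)
  PySem.List.pyGetD st.1 st.2.1 0  -- arr[start]; out of range (empty input) excluded by Pre_

-- ===== PORT B =====
-- one iteration of B's loop: rotate right by one (lst.insert(0, lst.pop())),
-- then delete the k-th element from the end (del lst[len(lst)-k], ported as pop? discarding the value)
def lastElementStepB (lst : List Int) (k : Int) : List Int :=
  match PySem.List.pop? lst (-1) with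
  | none => lst  -- unreachable: lst is never empty here (Python would raise IndexError)
  | some (x, rest) =>
    let lst := x :: rest
    let m : Int := (lst.length : Int) - k
    ((PySem.List.pop? lst m).map Prod.snd).getD lst

def last_element_alt (arr : List Int) : Int :=
  let lst := arr
  let lst := (PySem.List.pyRange 1 (PySem.Int.floordiv (arr.length : Int) 2 + 1) 1).foldl lastElementStepB lst
  PySem.List.pyGetD lst 0 0  -- lst[0]; empty input excluded by Pre_

-- ===== PRECONDITION & SPEC =====
-- A (and B) raise IndexError on the empty list; that is the only exclusion.
def Pre_last_element (arr : List Int) : Prop := arr ≠ []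
instance (arr : List Int) : Decidable (Pre_last_element arr) := by unfold Pre_last_element; infer_instance

def pvWitness_last_element : List Int := [3, 1, 4, 1, 5]

def Spec_last_element (arr : List Int) (out : Int) : Prop := out = last_element_alt arr
instance (arr : List Int) (out : Int) : Decidable (Spec_last_element arr out) := by unfold Spec_last_element; infer_instance

-- ===== CLAIM (what is proved, stated in full; the proofs are below) =====
def Claim_equal_last_element : Prop := ∀ (arr : List Int), Dom_last_element arr → Pre_last_element arr → Spec_last_element arr (last_element arr)

-- ===== LEMMAS AND PROOFS =====

-- rotation view of A's state: the list as B sees it, given A's (arr, start)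
def rotL (l : List Int) (s : Nat) : List Int := l.drop s ++ l.take s

lemma rotL_length (l : List Int) (s : Nat) : (rotL l s).length = l.length := by
  simp [rotL]; omega

lemma rotL_eq_rotate (l : List Int) (s : Nat) (hs : s ≤ l.length) : rotL l s = l.rotate s := by
  rw [List.rotate_eq_drop_append_take hs]; rfl

-- rotating right by one advances A's start pointer one step backwards (modularly)
lemma rotL_rotate (l : List Int) (s : Nat) (hs : s < l.length) :
    (rotL l s).drop ((rotL l s).length - 1) ++ (rotL l s).dropLast =
      rotL l (if s = 0 then l.length - 1 else s - 1) := by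
  have hlen : (rotL l s).length = l.length := by simp [rotL]; omega
  have h1 : (rotL l s).drop ((rotL l s).length - 1) ++ (rotL l s).dropLast
      = (rotL l s).rotate ((rotL l s).length - 1) := by
    rw [List.rotate_eq_drop_append_take (by omega), List.dropLast_eq_take, hlen]
  rw [h1, rotL_eq_rotate l s (by omega), List.rotate_rotate, List.length_rotate,
      rotL_eq_rotate l _ (by split <;> omega)]
  rcases Nat.eq_zero_or_pos s with h0 | h0
  · rw [if_pos h0, h0]; simp
  · rw [if_neg (by omega)]
    have : s + (l.length - 1) = (s - 1) + 1 * l.length := by omega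
    rw [this, ← List.rotate_mod, Nat.add_mul_mod_self_right, List.rotate_mod]

-- deleting at logical offset m of the rotated list is deleting at physical index
-- (s1 + m) mod length, with the start pointer stepping down on wraparound
lemma rotL_erase (l : List Int) (s1 m : Nat) (hs : s1 < l.length)
    (hm2 : m < l.length) :
    (rotL l s1).take m ++ (rotL l s1).drop (m + 1) =
      if s1 + m < l.length then rotL (l.eraseIdx (s1 + m)) s1
      else rotL (l.eraseIdx (s1 + m - l.length)) (s1 - 1) := by
  by_cases hc : s1 + m < l.length
  · rw [if_pos hc]
    have hwl : ((l.drop s1).take m).length = m := by simp; omega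
    have hal : (l.take s1).length = s1 := by simp; omega
    have hsplit : l.drop s1 = (l.drop s1).take m ++ l[s1 + m] :: l.drop (s1 + m + 1) := by
      have hdd : l.drop (s1 + m) = l[s1 + m] :: l.drop (s1 + m + 1) :=
        List.drop_eq_getElem_cons (by omega)
      conv_lhs => rw [← List.take_append_drop m (l.drop s1)]
      rw [List.drop_drop, hdd]
    have hrot : rotL l s1
        = (l.drop s1).take m ++ l[s1 + m] :: (l.drop (s1 + m + 1) ++ l.take s1) := by
      rw [rotL]
      conv_lhs => rw [hsplit]
      rw [List.append_assoc, List.cons_append]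
    have herase : l.eraseIdx (s1 + m)
        = (l.take s1 ++ (l.drop s1).take m) ++ l.drop (s1 + m + 1) := by
      rw [List.eraseIdx_eq_take_drop_succ, List.take_add]
    have h1 : (rotL l s1).take m = (l.drop s1).take m := by
      rw [hrot, List.take_left' hwl]
    have h2 : (rotL l s1).drop (m + 1) = l.drop (s1 + m + 1) ++ l.take s1 := by
      rw [hrot, List.drop_append, hwl, List.drop_of_length_le (by rw [hwl]; omega)]
      have h11 : m + 1 - m = 1 := by omega
      rw [h11]
      rfl
    have hfin : rotL (l.eraseIdx (s1 + m)) s1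
        = ((l.drop s1).take m ++ l.drop (s1 + m + 1)) ++ l.take s1 := by
      rw [herase, rotL, List.append_assoc, List.drop_left' hal, List.take_left' hal]
    rw [h1, h2, hfin]
    simp
  · rw [if_neg hc]
    have hd1 : s1 + m - l.length < s1 := by omega
    have ha1l : (l.take (s1 + m - l.length)).length = s1 + m - l.length := by simp; omega
    have hmidl : ((l.drop (s1 + m - l.length + 1)).take (s1 - 1 - (s1 + m - l.length))).length
        = s1 - 1 - (s1 + m - l.length) := by simp; omega
    have hbl : (l.drop s1).length = l.length - s1 := by simp
    have hdropmid : (l.drop (s1 + m - l.length + 1)).drop (s1 - 1 - (s1 + m - l.length))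
        = l.drop s1 := by
      rw [List.drop_drop]
      congr 1
      omega
    have htake1 : l.take (s1 + m - l.length + 1)
        = l.take (s1 + m - l.length) ++ [l[s1 + m - l.length]] := by
      rw [List.take_add, List.drop_eq_getElem_cons (by omega)]
      rfl
    have htake : l.take s1 = l.take (s1 + m - l.length)
        ++ l[s1 + m - l.length] :: (l.drop (s1 + m - l.length + 1)).take (s1 - 1 - (s1 + m - l.length)) := by
      have hs1 : s1 = (s1 + m - l.length + 1) + (s1 - 1 - (s1 + m - l.length)) := by omega
      conv_lhs => rw [hs1]
      rw [List.take_add, htake1, List.append_assoc, List.singleton_append]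
    have hrot : rotL l s1 = (l.drop s1 ++ l.take (s1 + m - l.length))
        ++ l[s1 + m - l.length] :: (l.drop (s1 + m - l.length + 1)).take (s1 - 1 - (s1 + m - l.length)) := by
      rw [rotL]
      conv_lhs => rw [htake]
      rw [← List.append_assoc]
    have hba : (l.drop s1 ++ l.take (s1 + m - l.length)).length = m := by
      rw [List.length_append, hbl, ha1l]; omega
    have herase : l.eraseIdx (s1 + m - l.length)
        = (l.take (s1 + m - l.length) ++ (l.drop (s1 + m - l.length + 1)).take (s1 - 1 - (s1 + m - l.length)))
          ++ l.drop s1 := by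
      rw [List.eraseIdx_eq_take_drop_succ]
      conv_lhs => rw [← List.take_append_drop (s1 - 1 - (s1 + m - l.length)) (l.drop (s1 + m - l.length + 1))]
      rw [hdropmid, ← List.append_assoc]
    have h1 : (rotL l s1).take m = l.drop s1 ++ l.take (s1 + m - l.length) := by
      rw [hrot, List.take_left' hba]
    have h2 : (rotL l s1).drop (m + 1)
        = (l.drop (s1 + m - l.length + 1)).take (s1 - 1 - (s1 + m - l.length)) := by
      rw [hrot, List.drop_append, hba, List.drop_of_length_le (by rw [hba]; omega)]
      have h11 : m + 1 - m = 1 := by omega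
      rw [h11]
      rfl
    have hpre : (l.take (s1 + m - l.length)
        ++ (l.drop (s1 + m - l.length + 1)).take (s1 - 1 - (s1 + m - l.length))).length = s1 - 1 := by
      rw [List.length_append, ha1l, hmidl]; omega
    have hfin : rotL (l.eraseIdx (s1 + m - l.length)) (s1 - 1)
        = l.drop s1 ++ (l.take (s1 + m - l.length)
          ++ (l.drop (s1 + m - l.length + 1)).take (s1 - 1 - (s1 + m - l.length))) := by
      rw [herase, rotL, List.drop_left' hpre, List.take_left' hpre]
    rw [h1, h2, hfin]
    simp

-- Python (s - 1) % L for 0 ≤ s < L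
lemma emod_sub_one {s L : Int} (h0 : 0 ≤ s) (h : s < L) :
    (s - 1) % L = if s = 0 then L - 1 else s - 1 := by
  split
  · subst_vars
    have e : ((0 : Int) - 1) % L = (L - 1 + L * (-1)) % L := by ring_nf
    rw [e, Int.add_mul_emod_self_left, Int.emod_eq_of_lt (by omega) (by omega)]
  · rw [Int.emod_eq_of_lt (by omega) (by omega)]

-- Python t % L for 0 ≤ t < 2L
lemma emod_window {t L : Int} (h0 : 0 ≤ t) (_hL : 0 < L) (h : t < 2 * L) :
    t % L = if t < L then t else t - L := by
  split
  · rw [Int.emod_eq_of_lt (by omega) (by omega)]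
  · have e : t % L = (t - L + L * 1) % L := by ring_nf
    rw [e, Int.add_mul_emod_self_left, Int.emod_eq_of_lt (by omega) (by omega)]

-- what one iteration of A's loop computes, at the Nat level
lemma stepA_eq (arr : List Int) (s : Nat) (k : Int) (hs : s < arr.length)
    (hk1 : 1 ≤ k) (hk2 : k + 1 ≤ (arr.length : Int)) :
    lastElementStepA (arr, (s : Int), (arr.length : Int)) k =
      (let s1 := if s = 0 then arr.length - 1 else s - 1
       let m := arr.length - k.toNat
       if s1 + m < arr.length then (arr.eraseIdx (s1 + m), ((s1 : Nat) : Int), (arr.length : Int) - 1)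
       else (arr.eraseIdx (s1 + m - arr.length), ((s1 - 1 : Nat) : Int), (arr.length : Int) - 1)) := by
  have hL : 0 < arr.length := by omega
  set L := arr.length with hLdef
  set s1 : Nat := if s = 0 then L - 1 else s - 1 with hs1
  set m : Nat := L - k.toNat with hm
  have hs1b : s1 < L := by split_ifs at hs1 <;> omega
  have hm1 : 1 ≤ m := by omega
  have hm2 : m < L := by omega
  have e1 : PySem.Int.mod ((s : Int) - 1) (L : Int) = (s1 : Int) := by
    rw [PySem.Int.mod_eq_emod_of_pos (by omega), emod_sub_one (by omega) (by omega)]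
    split_ifs at hs1 ⊢ <;> omega
  have e2 : PySem.Int.mod ((s1 : Int) + (L : Int) - k) (L : Int)
      = (if s1 + m < L then ((s1 + m : Nat) : Int) else ((s1 + m - L : Nat) : Int)) := by
    rw [PySem.Int.mod_eq_emod_of_pos (by omega), emod_window (by omega) (by omega) (by omega)]
    split_ifs <;> omega
  simp only [lastElementStepA]
  rw [e1, e2]
  by_cases hc : s1 + m < L
  · rw [if_pos hc, if_pos hc]
    rw [PySem.List.pop?_natCast arr (s1 + m) (by omega)]
    rw [if_neg (by omega)]
    rfl
  · rw [if_neg hc, if_neg hc]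
    rw [PySem.List.pop?_natCast arr (s1 + m - L) (by omega)]
    rw [if_pos (by omega)]
    simp only [Option.map_some, Option.getD_some]
    have e3 : (s1 : Int) - 1 = ((s1 - 1 : Nat) : Int) := by omega
    rw [e3]

-- what one iteration of B's loop computes, at the Nat level
lemma stepB_eq (lst : List Int) (k : Int) (hne : lst ≠ []) (hk1 : 1 ≤ k)
    (hk2 : k ≤ (lst.length : Int)) :
    lastElementStepB lst k =
      (lst.drop (lst.length - 1) ++ lst.dropLast).take (lst.length - k.toNat)
        ++ (lst.drop (lst.length - 1) ++ lst.dropLast).drop ((lst.length - k.toNat) + 1) := by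
  have hL : 0 < lst.length := List.length_pos_iff.mpr hne
  have hpop : PySem.List.pop? lst (-1) = some (lst.getLast hne, lst.dropLast) := by
    conv_lhs => rw [← List.dropLast_append_getLast hne]
    exact PySem.List.pop?_last lst.dropLast (lst.getLast hne)
  have hcons : lst.getLast hne :: lst.dropLast = lst.drop (lst.length - 1) ++ lst.dropLast := by
    rw [List.drop_length_sub_one hne]
    rfl
  have hrl : (lst.getLast hne :: lst.dropLast).length = lst.length := by
    simp only [List.length_cons, List.length_dropLast]; omega
  simp only [lastElementStepB, hpop]
  rw [hrl]
  have e1 : (lst.length : Int) - k = ((lst.length - k.toNat : Nat) : Int) := by omega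
  rw [e1, PySem.List.pop?_natCast _ _ (by rw [hrl]; omega)]
  simp only [Option.map_some, Option.getD_some]
  rw [List.eraseIdx_eq_take_drop_succ, hcons]

-- one loop iteration: B's rotated list stays the rotation of A's state
lemma step_sim (arr : List Int) (s : Nat) (k : Int) (hs : s < arr.length)
    (hk1 : 1 ≤ k) (hk2 : k + 1 ≤ (arr.length : Int)) :
    ∃ (arr' : List Int) (s' : Nat),
      lastElementStepA (arr, (s : Int), (arr.length : Int)) k
          = (arr', (s' : Int), (arr.length : Int) - 1) ∧
      arr'.length + 1 = arr.length ∧ s' < arr'.length ∧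
      lastElementStepB (rotL arr s) k = rotL arr' s' := by
  have hL : 0 < arr.length := by omega
  set L := arr.length with hLdef
  set s1 : Nat := if s = 0 then L - 1 else s - 1 with hs1
  set m : Nat := L - k.toNat with hm
  have hs1b : s1 < L := by split_ifs at hs1 <;> omega
  have hm1 : 1 ≤ m := by omega
  have hm2 : m < L := by omega
  have hBstep : lastElementStepB (rotL arr s) k
      = (rotL arr s1).take m ++ (rotL arr s1).drop (m + 1) := by
    rw [stepB_eq (rotL arr s) k (by simp [rotL]; omega) hk1 (by rw [rotL_length]; omega)]
    rw [rotL_rotate arr s hs, rotL_length, ← hs1, ← hm]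
  by_cases hc : s1 + m < L
  · refine ⟨arr.eraseIdx (s1 + m), s1, ?_, ?_, ?_, ?_⟩
    · rw [stepA_eq arr s k hs hk1 hk2]
      simp only [← hs1, ← hm, ← hLdef]
      rw [if_pos hc]
    · simp only [List.length_eraseIdx]; split <;> omega
    · simp only [List.length_eraseIdx]; split <;> omega
    · rw [hBstep, rotL_erase arr s1 m hs1b hm2, if_pos hc]
  · refine ⟨arr.eraseIdx (s1 + m - L), s1 - 1, ?_, ?_, ?_, ?_⟩
    · rw [stepA_eq arr s k hs hk1 hk2]
      simp only [← hs1, ← hm, ← hLdef]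
      rw [if_neg hc]
    · simp only [List.length_eraseIdx]; split <;> omega
    · simp only [List.length_eraseIdx]; split <;> omega
    · rw [hBstep, rotL_erase arr s1 m hs1b hm2, if_neg hc]

-- the whole loop, by induction on the number of remaining iterations
lemma loop_sim : ∀ (j : Nat) (k0 : Int) (arr : List Int) (s : Nat),
    s < arr.length → 1 ≤ k0 → k0 + 2 * (j : Int) - 1 ≤ (arr.length : Int) →
    ∃ (arr' : List Int) (s' : Nat),
      (PySem.List.pyRange k0 (k0 + (j : Int)) 1).foldl lastElementStepA
          (arr, (s : Int), (arr.length : Int)) = (arr', (s' : Int), (arr.length : Int) - (j : Int)) ∧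
      arr'.length + j = arr.length ∧ s' < arr'.length ∧
      (PySem.List.pyRange k0 (k0 + (j : Int)) 1).foldl lastElementStepB (rotL arr s)
          = rotL arr' s' := by
  intro j
  induction j with
  | zero =>
    intro k0 arr s hs hk0 hbound
    refine ⟨arr, s, ?_, by omega, hs, ?_⟩
    · rw [PySem.List.pyRange_one_eq_nil (by omega)]
      simp
    · rw [PySem.List.pyRange_one_eq_nil (by omega)]
      rfl
  | succ j ih =>
    intro k0 arr s hs hk0 hbound
    have hc1 : ((j + 1 : Nat) : Int) = (j : Int) + 1 := by push_cast; ring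
    rw [hc1] at hbound ⊢
    rw [PySem.List.pyRange_one_cons (by omega)]
    obtain ⟨arr1, s1, hA1, hlen1, hs1, hB1⟩ :=
      step_sim arr s k0 hs hk0 (by omega)
    have hlen1' : (arr1.length : Int) = (arr.length : Int) - 1 := by omega
    obtain ⟨arr', s', hA, hlen, hslt, hB⟩ :=
      ih (k0 + 1) arr1 s1 hs1 (by omega) (by omega)
    have e : k0 + ((j : Int) + 1) = (k0 + 1) + (j : Int) := by ring
    refine ⟨arr', s', ?_, by omega, hslt, ?_⟩
    · simp only [List.foldl_cons, hA1]
      rw [e, ← hlen1', hA]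
      have e2 : (arr1.length : Int) - (j : Int) = (arr.length : Int) - ((j : Int) + 1) := by omega
      rw [e2]
    · simp only [List.foldl_cons, hB1]
      rw [e, hB]

-- ===== VERDICT (by name: the statement is the Claim_ definition above) =====
theorem last_element_spec : Claim_equal_last_element := by
  intro arr _ hpre
  unfold Spec_last_element last_element last_element_alt
  have hn : 0 < arr.length := List.length_pos_iff.mpr hpre
  have hfd : PySem.Int.floordiv (arr.length : Int) 2 + 1 = 1 + ((arr.length / 2 : Nat) : Int) := by
    have h2 : PySem.Int.floordiv (arr.length : Int) 2 = ((arr.length / 2 : Nat) : Int) := by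
      exact_mod_cast PySem.Int.floordiv_natCast arr.length 2
    omega
  obtain ⟨arr', s', hA, hlen, hslt, hB⟩ :=
    loop_sim (arr.length / 2) 1 arr 0 (by omega) (by omega) (by omega)
  have hrot0 : rotL arr 0 = arr := by simp [rotL]
  rw [hrot0] at hB
  simp only [Nat.cast_zero] at hA
  simp only [hfd, hA, hB]
  have h0lt : 0 < (rotL arr' s').length := by rw [rotL_length]; omega
  rw [PySem.List.pyGetD_natCast, PySem.List.pyGetD_zero]
  rw [List.getD_eq_getElem arr' 0 hslt, List.getD_eq_getElem _ 0 h0lt]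
  show arr'[s'] = (arr'.drop s' ++ arr'.take s')[0]
  rw [List.getElem_append_left (by simp; omega)]
  rw [List.getElem_drop]
  simp
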